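-- pv_equiv track=rewrite | github.com/lingxiao-guo/blender_replay_render | 4d_replay/replay_object.py | compute_close_segments
-- ===== SOURCE A (Python) =====
-- def compute_close_segments(widths, vel_eps):
--     n = len(widths)
--     if n < 2:
--         return []
--     closing = [False] * n
--     opening = [False] * n
--     for i in range(1, n):
--         v = widths[i] - widths[i - 1]
--         if v < -vel_eps:
--             closing[i] = True
--         elif v > vel_eps:
--             opening[i] = True
--
--     close_moments = []
--     i = 1
--     while i < n:
--         if closing[i]:
--             j = i
--             while j + 1 < n and closing[j + 1]:
--                 j += 1
--             close_moments.append(j)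
--             i = j + 1
--         else:
--             i += 1
--
--     segments = []
--     for cm in close_moments:
--         end = cm
--         k = cm + 1
--         while k < n and not opening[k]:
--             end = k
--             k += 1
--         # Convert to 1-based timestep (use cm + 2 for robustness).
--         segments.append((cm + 2, end + 1))
--     return segments
-- ===== SOURCE B (Python) =====
-- def compute_close_segments(widths, vel_eps):
--     # Single backward pass: carry the index of the next opening moment and the
--     # sign of the next velocity, emitting a segment at each end of a closing run.
--     n = len(widths)
--     if n < 2:
--         return []
--     nxt = n        # index of the next opening moment after i (n if none)
--     s_next = 0     # velocity sign at i + 1 (0 beyond the end)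
--     rev = []
--     for i in range(n - 1, 0, -1):
--         v = widths[i] - widths[i - 1]
--         s = -1 if v < -vel_eps else (1 if v > vel_eps else 0)
--         if s == -1 and s_next != -1:
--             rev.append((i + 2, nxt))
--         if s == 1:
--             nxt = i
--         s_next = s
--     rev.reverse()
--     return rev
-- ===== Notes on version B (the rewrite author's own statement) =====
-- stated objective: alternative
-- what changed: Replaced A's flag arrays, close-moment while-loops and per-close-moment forward rescans with a single backward pass that carries the index of the next opening moment and the next velocity sign, emitting each segment in O(1).
import Mathlib
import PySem

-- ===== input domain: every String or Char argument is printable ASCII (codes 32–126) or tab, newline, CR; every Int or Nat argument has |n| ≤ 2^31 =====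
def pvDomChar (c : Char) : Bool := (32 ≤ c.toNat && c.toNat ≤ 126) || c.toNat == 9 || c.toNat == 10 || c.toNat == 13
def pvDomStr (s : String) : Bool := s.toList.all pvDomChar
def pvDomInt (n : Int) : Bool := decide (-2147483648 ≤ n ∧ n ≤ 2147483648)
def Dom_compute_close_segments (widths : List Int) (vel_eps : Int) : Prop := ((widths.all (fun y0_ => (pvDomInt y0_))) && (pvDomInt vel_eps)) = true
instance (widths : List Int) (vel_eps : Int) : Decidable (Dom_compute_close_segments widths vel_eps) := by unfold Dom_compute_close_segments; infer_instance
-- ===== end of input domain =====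

-- B replaces A's flag arrays and per-close-moment forward rescans by one backward pass
-- carrying the next opening index and the next velocity sign (alternative algorithm).

-- ===== PORT A =====
-- widths[i] with an index that is always in range: ported with the total PySem.List.pyGetD (exact here).

-- the flag-building for-loop: state (closing, opening), one pySetD per iteration
def pvStepA (widths : List Int) (vel_eps : Int) (st : List Bool × List Bool) (i : Int) :
    List Bool × List Bool :=
  let v := PySem.List.pyGetD widths i 0 - PySem.List.pyGetD widths (i - 1) 0
  if v < -vel_eps then (PySem.List.pySetD st.1 i true, st.2)
  else if v > vel_eps then (st.1, PySem.List.pySetD st.2 i true)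
  else st

def pvFlagsA (widths : List Int) (vel_eps : Int) (n : Nat) : List Bool × List Bool :=
  (PySem.List.pyRange 1 (n : Int) 1).foldl (pvStepA widths vel_eps)
    (List.replicate n false, List.replicate n false)

-- inner while loop 'while j + 1 < n and closing[j + 1]: j += 1'
def pvFindJ (closing : List Bool) (n j : Nat) : Nat :=
  if j + 1 < n ∧ closing.getD (j + 1) false then pvFindJ closing n (j + 1) else j
termination_by n - j

theorem pvFindJ_ge (closing : List Bool) (n j : Nat) : j ≤ pvFindJ closing n j := by
  unfold pvFindJ
  split
  · exact le_trans (Nat.le_succ j) (pvFindJ_ge closing n (j + 1))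
  · exact le_refl j
termination_by n - j

-- outer while loop collecting close_moments
def pvLoopCM (closing : List Bool) (n i : Nat) : List Nat :=
  if _h : i < n then
    if closing.getD i false then
      let j := pvFindJ closing n i
      j :: pvLoopCM closing n (j + 1)
    else pvLoopCM closing n (i + 1)
  else []
termination_by n - i
decreasing_by
  · have := pvFindJ_ge closing n i; omega
  · omega

-- 'while k < n and not opening[k]: end = k; k += 1'
def pvFindEnd (opening : List Bool) (n endv k : Nat) : Nat :=
  if k < n ∧ ¬ opening.getD k false then pvFindEnd opening n k (k + 1) else endv
termination_by n - k

def compute_close_segments (widths : List Int) (vel_eps : Int) : List (List Int) :=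
  let n := widths.length
  if n < 2 then []
  else
    let fl := pvFlagsA widths vel_eps n
    let close_moments := pvLoopCM fl.1 n 1
    close_moments.foldl
      (fun segs (cm : Nat) =>
        segs ++ [[(cm : Int) + 2, (pvFindEnd fl.2 n cm (cm + 1) : Int) + 1]])
      []

-- ===== PORT B =====
-- one iteration of B's backward loop: state (nxt, s_next, rev), index i
def pvStepB (widths : List Int) (vel_eps : Int) (st : Int × Int × List (List Int)) (i : Int) :
    Int × Int × List (List Int) :=
  let v := PySem.List.pyGetD widths i 0 - PySem.List.pyGetD widths (i - 1) 0
  let s : Int := if v < -vel_eps then -1 else if v > vel_eps then 1 else 0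
  let rev := if s = -1 ∧ st.2.1 ≠ -1 then st.2.2 ++ [[i + 2, st.1]] else st.2.2
  let nxt := if s = 1 then i else st.1
  (nxt, s, rev)

def compute_close_segments_alt (widths : List Int) (vel_eps : Int) : List (List Int) :=
  let n := widths.length
  if n < 2 then []
  else
    -- for i in range(n-1, 0, -1), then rev.reverse()
    let fin := (PySem.List.pyRange ((n : Int) - 1) 0 (-1)).foldl (pvStepB widths vel_eps)
      ((n : Int), 0, [])
    fin.2.2.reverse

-- ===== PRECONDITION & SPEC =====
def Spec_compute_close_segments (widths : List Int) (vel_eps : Int) (out : List (List Int)) : Prop := out = compute_close_segments_alt widths vel_eps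
instance (widths : List Int) (vel_eps : Int) (out : List (List Int)) : Decidable (Spec_compute_close_segments widths vel_eps out) := by unfold Spec_compute_close_segments; infer_instance

-- ===== CLAIM (what is proved, stated in full; the proofs are below) =====
def Claim_equal_compute_close_segments : Prop := ∀ (widths : List Int) (vel_eps : Int), Dom_compute_close_segments widths vel_eps → Spec_compute_close_segments widths vel_eps (compute_close_segments widths vel_eps)

-- ===== LEMMAS AND PROOFS =====

theorem pvFindJ_lt (closing : List Bool) (n j : Nat) (h : j < n) : pvFindJ closing n j < n := by
  unfold pvFindJ
  split
  · exact pvFindJ_lt closing n (j + 1) (by omega)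
  · exact h
termination_by n - j


-- The common abstraction: the velocity sign at index i (meaningful for 1 ≤ i < n).
def pvS (widths : List Int) (vel_eps : Int) (i : Nat) : Int :=
  let v := PySem.List.pyGetD widths (i : Int) 0 - PySem.List.pyGetD widths ((i : Int) - 1) 0
  if v < -vel_eps then -1 else if v > vel_eps then 1 else 0

-- next opening index ≥ i (n if none)
def pvNoF (S : Nat → Int) (n i : Nat) : Nat :=
  if i < n then (if S i = 1 then i else pvNoF S n (i + 1)) else n
termination_by n - i

theorem pvNoF_ge (S : Nat → Int) (n i : Nat) (h : i ≤ n) : i ≤ pvNoF S n i := by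
  unfold pvNoF
  split
  · split
    · exact le_refl i
    · exact le_trans (Nat.le_succ i) (pvNoF_ge S n (i + 1) (by omega))
  · omega
termination_by n - i

-- the segment emitted at i, if i ends a maximal closing run (meaningful for i < n)
def pvSegAt (S : Nat → Int) (n i : Nat) : List (List Int) :=
  if S i = -1 ∧ (i + 1 = n ∨ S (i + 1) ≠ -1) then
    [[(i : Int) + 2, (pvNoF S n (i + 1) : Int)]]
  else []

-- ascending segments for close moments in [i, n)
def pvSpec (S : Nat → Int) (n i : Nat) : List (List Int) :=
  if i < n then pvSegAt S n i ++ pvSpec S n (i + 1) else []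
termination_by n - i

-- descending segments for close moments in [1, m]
def pvDesc (S : Nat → Int) (n : Nat) : Nat → List (List Int)
  | 0 => []
  | m + 1 => pvSegAt S n (m + 1) ++ pvDesc S n m


def pvSG (S : Nat → Int) (n i : Nat) : Int := if i < n then S i else 0

-- pvS in terms of plain Nat-indexed getD (for 1 ≤ j)
theorem pvS_eq (w : List Int) (e : Int) (j : Nat) (hj : 1 ≤ j) :
    pvS w e j =
      (if w.getD j 0 - w.getD (j - 1) 0 < -e then -1
       else if w.getD j 0 - w.getD (j - 1) 0 > e then 1 else 0) := by
  unfold pvS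
  have h1 : ((j : Nat) : Int) - 1 = ((j - 1 : Nat) : Int) := by omega
  rw [h1]
  simp [PySem.List.pyGetD_natCast]

-- Nat-level version of A's flag-loop body
def pvBodyN (w : List Int) (e : Int) (st : List Bool × List Bool) (j : Nat) :
    List Bool × List Bool :=
  if w.getD j 0 - w.getD (j - 1) 0 < -e then (st.1.set j true, st.2)
  else if w.getD j 0 - w.getD (j - 1) 0 > e then (st.1, st.2.set j true)
  else st

theorem pvStepA_eq (w : List Int) (e : Int) (st : List Bool × List Bool) (k : Nat) :
    pvStepA w e st (1 + (k : Int)) = pvBodyN w e st (k + 1) := by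
  have h1 : (1 + (k : Int)) = ((k + 1 : Nat) : Int) := by push_cast; ring
  have h2 : ((k + 1 : Nat) : Int) - 1 = ((k : Nat) : Int) := by push_cast; ring
  unfold pvStepA pvBodyN
  rw [h1, h2]
  simp only [PySem.List.pyGetD_natCast, PySem.List.pySetD_natCast, Nat.add_sub_cancel]

theorem pvGetD_set (l : List Bool) (i j : Nat) (b : Bool) :
    (l.set i b).getD j false = if j = i ∧ i < l.length then b else l.getD j false := by
  rcases Nat.lt_or_ge j l.length with hj | hj
  · rw [List.getD_eq_getElem?_getD, List.getD_eq_getElem?_getD, List.getElem?_set]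
    by_cases h : i = j
    · subst h; simp [hj]
    · rw [if_neg h, if_neg (by tauto)]
  · rw [List.getD_eq_getElem?_getD, List.getD_eq_getElem?_getD]
    have h1 : l[j]? = none := List.getElem?_eq_none hj
    have h2 : (l.set i b)[j]? = none := by
      apply List.getElem?_eq_none; simpa using hj
    rw [h1, h2]
    split
    · rcases ‹j = i ∧ i < l.length› with ⟨rfl, hi⟩
      exact absurd hi (by omega)
    · rfl

theorem pvFlags_inv (w : List Int) (e : Int) (n m : Nat) (hm : m ≤ n - 1) (hn : 2 ≤ n) :
    ((List.range m).foldl (fun st k => pvBodyN w e st (k + 1))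
        (List.replicate n false, List.replicate n false)).1.length = n ∧
    ((List.range m).foldl (fun st k => pvBodyN w e st (k + 1))
        (List.replicate n false, List.replicate n false)).2.length = n ∧
    (∀ j, ((List.range m).foldl (fun st k => pvBodyN w e st (k + 1))
        (List.replicate n false, List.replicate n false)).1.getD j false
        = decide (1 ≤ j ∧ j < m + 1 ∧ pvS w e j = -1)) ∧
    (∀ j, ((List.range m).foldl (fun st k => pvBodyN w e st (k + 1))
        (List.replicate n false, List.replicate n false)).2.getD j false
        = decide (1 ≤ j ∧ j < m + 1 ∧ pvS w e j = 1)) := by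
  induction m with
  | zero =>
    refine ⟨by simp, by simp, ?_, ?_⟩ <;>
      · intro j
        simp only [List.range_zero, List.foldl_nil]
        have hrep : (List.replicate n false).getD j false = false := by
          rw [List.getD_eq_getElem?_getD]
          rcases Nat.lt_or_ge j n with h | h
          · simp [h]
          · rw [List.getElem?_eq_none (by simpa using h)]; rfl
        rw [hrep]
        symm
        simp only [decide_eq_false_iff_not]
        rintro ⟨a, b, _⟩
        omega
  | succ m ih =>
    obtain ⟨L1, L2, H1, H2⟩ := ih (by omega)
    rw [List.range_succ, List.foldl_append, List.foldl_cons, List.foldl_nil]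
    set st := (List.range m).foldl (fun st k => pvBodyN w e st (k + 1))
        (List.replicate n false, List.replicate n false) with hst
    have hSm := pvS_eq w e (m + 1) (by omega)
    have hmn : m + 1 < n := by omega
    unfold pvBodyN
    split_ifs with hv1 hv2
    · refine ⟨by simpa using L1, L2, ?_, ?_⟩
      · intro j
        rw [pvGetD_set, L1, H1 j]
        have hS : pvS w e (m + 1) = -1 := by rw [hSm, if_pos hv1]
        by_cases hjm : j = m + 1
        · subst hjm
          rw [if_pos ⟨rfl, hmn⟩]
          simp [hS]
        · rw [if_neg (by tauto), decide_eq_decide]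
          constructor <;> rintro ⟨a, b, c⟩ <;> exact ⟨a, by omega, c⟩
      · intro j
        rw [H2 j]
        have hS : pvS w e (m + 1) = -1 := by rw [hSm, if_pos hv1]
        by_cases hjm : j = m + 1
        · subst hjm
          simp [hS]
        · rw [decide_eq_decide]
          constructor <;> rintro ⟨a, b, c⟩ <;> exact ⟨a, by omega, c⟩
    · refine ⟨L1, by simpa using L2, ?_, ?_⟩
      · intro j
        rw [H1 j]
        have hS : pvS w e (m + 1) = 1 := by rw [hSm, if_neg hv1, if_pos hv2]
        by_cases hjm : j = m + 1
        · subst hjm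
          simp [hS]
        · rw [decide_eq_decide]
          constructor <;> rintro ⟨a, b, c⟩ <;> exact ⟨a, by omega, c⟩
      · intro j
        rw [pvGetD_set, L2, H2 j]
        have hS : pvS w e (m + 1) = 1 := by rw [hSm, if_neg hv1, if_pos hv2]
        by_cases hjm : j = m + 1
        · subst hjm
          rw [if_pos ⟨rfl, hmn⟩]
          simp [hS]
        · rw [if_neg (by tauto), decide_eq_decide]
          constructor <;> rintro ⟨a, b, c⟩ <;> exact ⟨a, by omega, c⟩
    · have hS : pvS w e (m + 1) = 0 := by rw [hSm, if_neg hv1, if_neg hv2]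
      refine ⟨L1, L2, ?_, ?_⟩ <;>
        · intro j
          first
          | rw [H1 j]
          | rw [H2 j]
          by_cases hjm : j = m + 1
          · subst hjm
            simp [hS]
          · rw [decide_eq_decide]
            constructor <;> rintro ⟨a, b, c⟩ <;> exact ⟨a, by omega, c⟩

theorem pvFlags_getD (w : List Int) (e : Int) (n : Nat) (hn : 2 ≤ n) :
    (∀ j, (pvFlagsA w e n).1.getD j false = decide (1 ≤ j ∧ j < n ∧ pvS w e j = -1)) ∧
    (∀ j, (pvFlagsA w e n).2.getD j false = decide (1 ≤ j ∧ j < n ∧ pvS w e j = 1)) := by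
  unfold pvFlagsA
  rw [PySem.List.pyRange_one]
  have ht : ((n : Int) - 1).toNat = n - 1 := by omega
  rw [ht, List.foldl_map]
  have hco : List.foldl (fun x (y : Nat) => pvStepA w e x (1 + (y : Int)))
      (List.replicate n false, List.replicate n false) (List.range (n - 1))
      = List.foldl (fun st k => pvBodyN w e st (k + 1))
      (List.replicate n false, List.replicate n false) (List.range (n - 1)) :=
    PySem.List.foldl_congr_mem (List.range (n - 1)) _ _ _ (fun acc x _ => pvStepA_eq w e acc x)
  rw [hco]
  have hmn : n - 1 + 1 = n := by omega
  obtain ⟨_, _, H1, H2⟩ := pvFlags_inv w e n (n - 1) (le_refl _) hn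
  rw [hmn] at H1 H2
  exact ⟨H1, H2⟩

-- S is -1 on the whole run found by pvFindJ
theorem pvFindJ_all (C : List Bool) (n : Nat) (S : Nat → Int)
    (hC : ∀ k, C.getD k false = decide (1 ≤ k ∧ k < n ∧ S k = -1))
    (j : Nat) (h1 : 1 ≤ j) (_hj : j < n) (hSj : S j = -1) :
    ∀ k, j ≤ k → k ≤ pvFindJ C n j → S k = -1 := by
  rw [pvFindJ]
  split
  · rename_i h
    have hS1 : S (j + 1) = -1 := by
      have hdec : decide (1 ≤ j + 1 ∧ j + 1 < n ∧ S (j + 1) = -1) = true := by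
        rw [← hC (j + 1)]; exact h.2
      exact (of_decide_eq_true hdec).2.2
    intro k hk1 hk2
    rcases Nat.eq_or_lt_of_le hk1 with rfl | hlt
    · exact hSj
    · exact pvFindJ_all C n S hC (j + 1) (by omega) h.1 hS1 k (by omega) hk2
  · intro k hk1 hk2
    have : k = j := by omega
    rw [this]; exact hSj
termination_by n - j

-- the run found by pvFindJ is maximal
theorem pvFindJ_stop (C : List Bool) (n : Nat) (S : Nat → Int)
    (hC : ∀ k, C.getD k false = decide (1 ≤ k ∧ k < n ∧ S k = -1))
    (j : Nat) (h1 : 1 ≤ j) (hj : j < n) :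
    pvFindJ C n j + 1 = n ∨ S (pvFindJ C n j + 1) ≠ -1 := by
  rw [pvFindJ]
  split
  · rename_i h
    exact pvFindJ_stop C n S hC (j + 1) (by omega) h.1
  · rename_i h
    by_cases hjn : j + 1 < n
    · right
      intro hS
      exact h ⟨hjn, by rw [hC (j + 1)]; exact decide_eq_true ⟨by omega, hjn, hS⟩⟩
    · left; omega
termination_by n - j

-- A's forward rescan computes the next opening index minus one
theorem pvFindEnd_eq (O : List Bool) (n : Nat) (S : Nat → Int)
    (hO : ∀ k, O.getD k false = decide (1 ≤ k ∧ k < n ∧ S k = 1))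
    (k : Nat) (h1 : 1 ≤ k) (hk : k ≤ n) (e : Nat) (he : e + 1 = k) :
    pvFindEnd O n e k = pvNoF S n k - 1 := by
  rw [pvFindEnd]
  split
  · rename_i h
    have hSk : S k ≠ 1 := by
      intro hS
      exact h.2 (by rw [hO k]; exact decide_eq_true ⟨h1, h.1, hS⟩)
    rw [pvNoF, if_pos h.1, if_neg hSk]
    exact pvFindEnd_eq O n S hO (k + 1) (by omega) (by omega) k rfl
  · rename_i h
    by_cases hkn : k < n
    · have hOk : O.getD k false = true := by
        by_cases hb : O.getD k false = true
        · exact hb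
        · exact absurd (fun hq => hb hq) (by simpa using h ⟨hkn, ·⟩)
      have hdec : decide (1 ≤ k ∧ k < n ∧ S k = 1) = true := by rw [← hO k]; exact hOk
      have hSk : S k = 1 := (of_decide_eq_true hdec).2.2
      rw [pvNoF, if_pos hkn, if_pos hSk]
      omega
    · rw [pvNoF, if_neg hkn]
      omega
termination_by n - k

-- the spec over a closing run collapses to one segment at the run's end
theorem pvRun_spec (S : Nat → Int) (n j : Nat) (_hj : j < n)
    (hstop : j + 1 = n ∨ S (j + 1) ≠ -1) (i : Nat) (h1 : 1 ≤ i) (hij : i ≤ j)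
    (hrun : ∀ k, i ≤ k → k ≤ j → S k = -1) :
    pvSpec S n i = [(j : Int) + 2, (pvNoF S n (j + 1) : Int)] :: pvSpec S n (j + 1) := by
  rcases Nat.eq_or_lt_of_le hij with rfl | hlt
  · rw [pvSpec, if_pos _hj]
    rw [pvSegAt, if_pos ⟨hrun i (le_refl i) (le_refl i), hstop⟩]
    rfl
  · rw [pvSpec, if_pos (by omega)]
    have hcond : ¬ (S i = -1 ∧ (i + 1 = n ∨ S (i + 1) ≠ -1)) := by
      rintro ⟨-, h2⟩
      rcases h2 with h2 | h2
      · omega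
      · exact h2 (hrun (i + 1) (by omega) (by omega))
    rw [pvSegAt, if_neg hcond, List.nil_append]
    exact pvRun_spec S n j _hj hstop (i + 1) (by omega) (by omega)
      (fun k hk1 hk2 => hrun k (by omega) hk2)
termination_by j - i

-- A's close-moment loop, mapped through its segment builder, is the spec
theorem pvLoop_eq (n : Nat) (S : Nat → Int) (C O : List Bool)
    (hC : ∀ k, C.getD k false = decide (1 ≤ k ∧ k < n ∧ S k = -1))
    (hO : ∀ k, O.getD k false = decide (1 ≤ k ∧ k < n ∧ S k = 1))
    (i : Nat) (h1 : 1 ≤ i) :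
    (pvLoopCM C n i).map
        (fun (cm : Nat) => [(cm : Int) + 2, ((pvFindEnd O n cm (cm + 1) : Nat) : Int) + 1])
      = pvSpec S n i := by
  rw [pvLoopCM]
  split
  · rename_i hin
    split
    · rename_i hCi
      have hdec : decide (1 ≤ i ∧ i < n ∧ S i = -1) = true := by rw [← hC i]; exact hCi
      have hSi : S i = -1 := (of_decide_eq_true hdec).2.2
      have hij : i ≤ pvFindJ C n i := pvFindJ_ge C n i
      have hjn : pvFindJ C n i < n := pvFindJ_lt C n i hin
      have hall := pvFindJ_all C n S hC i h1 hin hSi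
      have hstop := pvFindJ_stop C n S hC i h1 hin
      rw [List.map_cons,
        pvLoop_eq n S C O hC hO (pvFindJ C n i + 1) (by omega),
        pvRun_spec S n (pvFindJ C n i) hjn hstop i h1 hij
          (fun k hk1 hk2 => hall k hk1 hk2)]
      have hfe := pvFindEnd_eq O n S hO (pvFindJ C n i + 1) (by omega) (by omega)
        (pvFindJ C n i) rfl
      have hge : pvFindJ C n i + 1 ≤ pvNoF S n (pvFindJ C n i + 1) :=
        pvNoF_ge S n _ (by omega)
      have hcast : ((pvNoF S n (pvFindJ C n i + 1) - 1 : Nat) : Int) + 1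
          = ((pvNoF S n (pvFindJ C n i + 1) : Nat) : Int) := by omega
      rw [hfe, hcast]
    · rename_i hCi
      have hSi : S i ≠ -1 := by
        intro hS
        exact hCi (by rw [hC i]; exact decide_eq_true ⟨h1, hin, hS⟩)
      conv_rhs => rw [pvSpec]
      rw [if_pos hin, pvSegAt, if_neg (fun hc => hSi hc.1), List.nil_append]
      exact pvLoop_eq n S C O hC hO (i + 1) (by omega)
  · rename_i hin
    rw [pvSpec, if_neg hin]
    rfl
termination_by n - i
decreasing_by
  all_goals
    try have := pvFindJ_ge C n i
    omega

-- one step of B's backward loop, in spec terms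
theorem pvStepB_eq (w : List Int) (e : Int) (n m : Nat) (R : List (List Int))
    (hm : m + 2 ≤ n) :
    pvStepB w e (((pvNoF (pvS w e) n (m + 2) : Nat) : Int), pvSG (pvS w e) n (m + 2), R)
        (((m + 1 : Nat) : Int))
      = (((pvNoF (pvS w e) n (m + 1) : Nat) : Int), pvSG (pvS w e) n (m + 1),
         R ++ pvSegAt (pvS w e) n (m + 1)) := by
  have hs : (if PySem.List.pyGetD w (((m + 1 : Nat) : Int)) 0
        - PySem.List.pyGetD w (((m + 1 : Nat) : Int) - 1) 0 < -e then (-1 : Int)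
      else if PySem.List.pyGetD w (((m + 1 : Nat) : Int)) 0
        - PySem.List.pyGetD w (((m + 1 : Nat) : Int) - 1) 0 > e then 1 else 0)
      = pvS w e (m + 1) := rfl
  unfold pvStepB
  simp only [hs]
  have hcond : (pvS w e (m + 1) = -1 ∧ pvSG (pvS w e) n (m + 2) ≠ -1)
      ↔ (pvS w e (m + 1) = -1 ∧ (m + 1 + 1 = n ∨ pvS w e (m + 1 + 1) ≠ -1)) := by
    unfold pvSG
    simp only [show m + 1 + 1 = m + 2 from rfl]
    rcases Nat.lt_or_ge (m + 2) n with h | h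
    · rw [if_pos h]
      constructor
      · rintro ⟨a, b⟩; exact ⟨a, Or.inr b⟩
      · rintro ⟨a, b | b⟩
        · omega
        · exact ⟨a, b⟩
    · have h2 : m + 2 = n := by omega
      rw [if_neg (by omega)]
      constructor
      · rintro ⟨a, _⟩; exact ⟨a, Or.inl h2⟩
      · rintro ⟨a, _⟩; exact ⟨a, by decide⟩
  refine Prod.ext ?_ (Prod.ext ?_ ?_)
  · show (if pvS w e (m + 1) = 1 then (((m + 1 : Nat) : Int)) else _) = _
    have hno : pvNoF (pvS w e) n (m + 1)
        = if pvS w e (m + 1) = 1 then m + 1 else pvNoF (pvS w e) n (m + 2) := by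
      rw [pvNoF, if_pos (by omega : m + 1 < n)]
    rw [hno]
    split <;> rfl
  · show pvS w e (m + 1) = pvSG (pvS w e) n (m + 1)
    unfold pvSG
    rw [if_pos (by omega : m + 1 < n)]
  · show (if pvS w e (m + 1) = -1 ∧ pvSG (pvS w e) n (m + 2) ≠ -1 then
        R ++ [[((m + 1 : Nat) : Int) + 2, ((pvNoF (pvS w e) n (m + 2) : Nat) : Int)]]
      else R) = R ++ pvSegAt (pvS w e) n (m + 1)
    unfold pvSegAt
    by_cases hc : pvS w e (m + 1) = -1 ∧ (m + 1 + 1 = n ∨ pvS w e (m + 1 + 1) ≠ -1)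
    · rw [if_pos (hcond.mpr hc), if_pos hc]
    · rw [if_neg (fun hx => hc (hcond.mp hx)), if_neg hc, List.append_nil]

-- B's backward fold computes the descending segment list
theorem pvBfold (w : List Int) (e : Int) (n : Nat) :
    ∀ m, m + 1 ≤ n → ∀ R,
      (PySem.List.pyRange ((m : Nat) : Int) 0 (-1)).foldl (pvStepB w e)
          (((pvNoF (pvS w e) n (m + 1) : Nat) : Int), pvSG (pvS w e) n (m + 1), R)
        = (((pvNoF (pvS w e) n 1 : Nat) : Int), pvSG (pvS w e) n 1,
           R ++ pvDesc (pvS w e) n m) := by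
  intro m
  induction m with
  | zero =>
    intro _ R
    rw [PySem.List.pyRange_neg_one_eq_nil (by norm_num)]
    simp [pvDesc]
  | succ m ih =>
    intro hm R
    rw [PySem.List.pyRange_neg_one_cons (by positivity)]
    have hc1 : ((m + 1 : Nat) : Int) - 1 = ((m : Nat) : Int) := by push_cast; ring
    rw [List.foldl_cons, pvStepB_eq w e n m R (by omega), hc1, ih (by omega)]
    have hdesc : pvDesc (pvS w e) n (m + 1) = pvSegAt (pvS w e) n (m + 1) ++ pvDesc (pvS w e) n m := rfl
    rw [hdesc, List.append_assoc]

theorem pvSegAt_reverse (S : Nat → Int) (n i : Nat) :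
    (pvSegAt S n i).reverse = pvSegAt S n i := by
  unfold pvSegAt
  split <;> rfl

-- reversing the descending list and appending the remaining spec gives the full spec
theorem pvDesc_rev (S : Nat → Int) (n : Nat) :
    ∀ m, m < n → (pvDesc S n m).reverse ++ pvSpec S n (m + 1) = pvSpec S n 1 := by
  intro m
  induction m with
  | zero => intro _; simp [pvDesc]
  | succ m ih =>
    intro hm
    have h1 : pvDesc S n (m + 1) = pvSegAt S n (m + 1) ++ pvDesc S n m := rfl
    rw [h1, List.reverse_append, pvSegAt_reverse, List.append_assoc]
    have h2 : pvSegAt S n (m + 1) ++ pvSpec S n (m + 2) = pvSpec S n (m + 1) := by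
      conv_rhs => rw [pvSpec]
      rw [if_pos hm]
    rw [h2]
    exact ih (by omega)

-- ===== VERDICT (by name: the statement is the Claim_ definition above) =====
theorem compute_close_segments_spec : Claim_equal_compute_close_segments := by
  intro widths vel_eps _hdom
  unfold Spec_compute_close_segments
  unfold compute_close_segments compute_close_segments_alt
  by_cases h2 : widths.length < 2
  · simp [h2]
  · simp only [if_neg h2]
    have hn : 2 ≤ widths.length := by omega
    obtain ⟨hC, hO⟩ := pvFlags_getD widths vel_eps widths.length hn
    rw [PySem.List.foldl_append_singleton_eq_map, List.nil_append,
      pvLoop_eq widths.length (pvS widths vel_eps) _ _ hC hO 1 (le_refl 1)]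
    have hn1 : widths.length - 1 + 1 = widths.length := by omega
    have hnoF : pvNoF (pvS widths vel_eps) widths.length widths.length = widths.length := by
      rw [pvNoF, if_neg (by omega)]
    have hsg : pvSG (pvS widths vel_eps) widths.length widths.length = 0 := by
      unfold pvSG
      rw [if_neg (by omega)]
    have hr : ((widths.length : Nat) : Int) - 1 = ((widths.length - 1 : Nat) : Int) := by omega
    rw [hr]
    have hbf := pvBfold widths vel_eps widths.length (widths.length - 1) (by omega) []
    rw [hn1, hnoF, hsg] at hbf
    rw [hbf]
    simp only [List.nil_append]
    have hspec_n : pvSpec (pvS widths vel_eps) widths.length widths.length = [] := by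
      rw [pvSpec, if_neg (by omega)]
    have hdr := pvDesc_rev (pvS widths vel_eps) widths.length (widths.length - 1) (by omega)
    rw [hn1, hspec_n, List.append_nil] at hdr
    rw [hdr]
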